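-- pv_equiv track=rewrite | github.com/kskrueger/PythonLearning | scr/edx/Poem_Mixer.py | word_mixer
-- ===== SOURCE A (Python) =====
-- def word_mixer(word_list):
--     word_list.sort()
--     new_list = []
--     while len(word_list) > 5:
--         new_list.append(word_list.pop(-5))
--         new_list.append(word_list.pop(0))
--         new_list.append(word_list.pop(-1))
--     return new_list
-- ===== SOURCE B (Python) =====
-- # Equivalence is about the return value; B also replicates A's in-place effect
-- # (word_list left sorted with the <=5 leftover elements).
-- def word_mixer(word_list):
--     word_list.sort()
--     out = []
--     n = len(word_list)
--     if n <= 5: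
--         return out
--     s = list(word_list)
--     f, b = 0, n - 5
--     tail = s[b:]          # the current last 5 elements; O(1)-sized buffer
--     while (b - f) + len(tail) > 5:
--         out.append(tail.pop(0))   # pop(-5)
--         out.append(s[f])          # pop(0)
--         f += 1
--         out.append(tail.pop())    # pop(-1)
--         while len(tail) < 5 and f < b:   # refill the tail buffer from the middle
--             b -= 1
--             tail.insert(0, s[b])
--     word_list[:] = s[f:b] + tail
--     return out
-- ===== Notes on version B (the rewrite author's own statement) =====
-- stated objective: faster
-- what changed: A repeatedly pops from the middle and front of a shrinking list (each pop O(n)); B sorts once and walks the sorted array with two indices plus a constant-size (<=5) tail buffer, so every step is O(1).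
import Mathlib
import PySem

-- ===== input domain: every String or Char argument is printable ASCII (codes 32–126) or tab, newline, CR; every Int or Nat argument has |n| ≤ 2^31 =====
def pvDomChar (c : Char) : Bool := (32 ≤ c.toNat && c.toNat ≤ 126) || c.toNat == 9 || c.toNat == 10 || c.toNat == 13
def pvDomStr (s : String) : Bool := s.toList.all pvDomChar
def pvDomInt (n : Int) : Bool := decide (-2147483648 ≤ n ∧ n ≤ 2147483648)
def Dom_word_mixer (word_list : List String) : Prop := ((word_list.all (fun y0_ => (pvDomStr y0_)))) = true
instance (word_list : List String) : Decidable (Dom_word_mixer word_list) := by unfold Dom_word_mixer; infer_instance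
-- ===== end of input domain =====

-- B replaces A's quadratic pop-simulation by a sorted-array walk with two indices and a
-- constant-size tail buffer (O(n log n)); equivalence is about the RETURN value (A mutates
-- word_list in place; the Python B replicates that mutation, not modelled here).

-- ===== PORT A =====
def wmLoopA (wl acc : List String) : List String :=
  if 5 < wl.length then
    match h5 : PySem.List.pop? wl (-5) with
    | none => acc
    | some (x, wl1) =>
      match h0 : PySem.List.pop? wl1 0 with
      | none => acc ++ [x]
      | some (y, wl2) =>
        match h1 : PySem.List.pop? wl2 (-1) with
        | none => (acc ++ [x]) ++ [y]
        | some (z, wl3) => wmLoopA wl3 (((acc ++ [x]) ++ [y]) ++ [z])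
  else acc
termination_by wl.length
decreasing_by
  have e5 := PySem.List.length_of_pop?_eq_some _ h5
  have e0 := PySem.List.length_of_pop?_eq_some _ h0
  have e1 := PySem.List.length_of_pop?_eq_some _ h1
  simp only at e5 e0 e1
  omega

def word_mixer (word_list : List String) : List String :=
  wmLoopA (PySem.List.sorted word_list (fun w => w) false) []

-- ===== PORT B =====
def wmRefill (s : List String) (f b : Nat) (tail : List String) : Nat × List String :=
  if tail.length < 5 ∧ f < b then
    wmRefill s f (b - 1) (PySem.List.insert tail 0 ((PySem.List.pyGet? s ((b - 1 : Nat) : Int)).getD ""))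
  else (b, tail)
termination_by b
decreasing_by omega

-- measure bound cited by wmLoopB's termination proof (hence above the claim block)
theorem wmRefill_measure (s : List String) (b f : Nat) (t : List String) :
    ((wmRefill s f b t).1 - f) + (wmRefill s f b t).2.length ≤ (b - f) + t.length := by
  induction b using Nat.strong_induction_on generalizing t with
  | _ b ih =>
    rw [wmRefill]
    split_ifs with h
    · have := ih (b - 1) (by omega) (PySem.List.insert t 0 ((PySem.List.pyGet? s ((b - 1 : Nat) : Int)).getD ""))
      simp only [PySem.List.insert_zero, List.length_cons] at this ⊢
      omega
    · simp

def wmLoopB (s : List String) (f b : Nat) (tail acc : List String) : List String :=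
  if 5 < (b - f) + tail.length then
    match h0 : PySem.List.pop? tail 0 with
    | none => acc
    | some (x, tail1) =>
      let y := (PySem.List.pyGet? s ((f : Nat) : Int)).getD ""
      match h1 : PySem.List.pop? tail1 (-1) with
      | none => (acc ++ [x]) ++ [y]
      | some (z, tail2) =>
        wmLoopB s (f + 1) (wmRefill s (f + 1) b tail2).1 (wmRefill s (f + 1) b tail2).2
          (((acc ++ [x]) ++ [y]) ++ [z])
  else acc
termination_by (b - f) + tail.length
decreasing_by
  have e0 := PySem.List.length_of_pop?_eq_some _ h0
  have e1 := PySem.List.length_of_pop?_eq_some _ h1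
  have hm := wmRefill_measure s b (f + 1) tail2
  simp only at e0 e1
  omega

def word_mixer_alt (word_list : List String) : List String :=
  let s := PySem.List.sorted word_list (fun w => w) false
  let n := s.length
  if n ≤ 5 then []
  else wmLoopB s 0 (n - 5) (PySem.List.slice s (some ((n - 5 : Nat) : Int)) none) []

-- ===== PRECONDITION & SPEC =====
def Spec_word_mixer (word_list : List String) (out : List String) : Prop := out = word_mixer_alt word_list
instance (word_list : List String) (out : List String) : Decidable (Spec_word_mixer word_list out) := by unfold Spec_word_mixer; infer_instance

-- ===== CLAIM (what is proved, stated in full; the proofs are below) =====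
def Claim_equal_word_mixer : Prop := ∀ (word_list : List String), Dom_word_mixer word_list → Spec_word_mixer word_list (word_mixer word_list)

-- ===== LEMMAS AND PROOFS =====

-- the still-unconsumed middle segment s[f:b] of the sorted array
def wmExt (s : List String) (f b : Nat) : List String := (s.drop f).take (b - f)

theorem wmExt_length (s : List String) (f b : Nat) (hb : b ≤ s.length) :
    (wmExt s f b).length = b - f := by
  simp [wmExt]; omega

theorem wmExt_cons (s : List String) (f b : Nat) (hf : f < b) (hb : b ≤ s.length) :
    wmExt s f b = s.getD f "" :: wmExt s (f + 1) b := by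
  have hfl : f < s.length := by omega
  have hd : s.drop f = s[f] :: s.drop (f + 1) := List.drop_eq_getElem_cons hfl
  have hbf : b - f = (b - (f + 1)) + 1 := by omega
  unfold wmExt
  rw [hd, hbf, List.take_succ_cons, List.getD_eq_getElem?_getD,
    List.getElem?_eq_getElem hfl]
  rfl

theorem wmExt_snoc (s : List String) (f b : Nat) (hf : f < b) (hb : b ≤ s.length) :
    wmExt s f b = wmExt s f (b - 1) ++ [s.getD (b - 1) ""] := by
  have hbf : b - f = (b - 1 - f) + 1 := by omega
  have hidx : f + (b - 1 - f) = b - 1 := by omega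
  have hlt : b - 1 < s.length := by omega
  simp [wmExt, hbf, List.take_succ, List.getElem?_drop, hidx,
    List.getElem?_eq_getElem hlt, List.getD]

theorem wmRefill_spec (s : List String) (b f : Nat) (t : List String)
    (hfb : f ≤ b) (hb : b ≤ s.length) (ht : t.length ≤ 5) :
    f ≤ (wmRefill s f b t).1 ∧ (wmRefill s f b t).1 ≤ b ∧
    (wmRefill s f b t).2.length ≤ 5 ∧
    ((wmRefill s f b t).2.length < 5 → (wmRefill s f b t).1 = f) ∧
    wmExt s f (wmRefill s f b t).1 ++ (wmRefill s f b t).2 = wmExt s f b ++ t := by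
  induction b using Nat.strong_induction_on generalizing t with
  | _ b ih =>
    rw [wmRefill]
    split_ifs with h
    · have hv : (PySem.List.pyGet? s ((b - 1 : Nat) : Int)).getD "" = s.getD (b - 1) "" := by
        rw [PySem.List.pyGet?_natCast, List.getD_eq_getElem?_getD]
      have := ih (b - 1) (by omega)
        (PySem.List.insert t 0 ((PySem.List.pyGet? s ((b - 1 : Nat) : Int)).getD ""))
        (by omega) (by omega)
        (by simp only [PySem.List.insert_zero, List.length_cons]; omega)
      refine ⟨by omega, by omega, this.2.2.1, by omega, ?_⟩
      rw [this.2.2.2.2]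
      rw [wmExt_snoc s f b h.2 hb]
      simp [PySem.List.insert_zero, List.getD]
    · dsimp only
      exact ⟨hfb, le_refl b, ht, fun h5 => by omega, rfl⟩

theorem wmEraseIdx_append (l : List String) (x : String) (r : List String) :
    (l ++ x :: r).eraseIdx l.length = l ++ r := by
  induction l with
  | nil => simp
  | cons a l ih => simpa using ih

theorem wmPop_neg5 (e : List String) (t0 t1 t2 t3 t4 : String) :
    PySem.List.pop? (e ++ [t0, t1, t2, t3, t4]) (-5) = some (t0, e ++ [t1, t2, t3, t4]) := by
  have hlen : (e ++ [t0, t1, t2, t3, t4]).length = e.length + 5 := by simp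
  simp only [PySem.List.pop?, PySem.List.pyIdx?, hlen]
  norm_num
  have h2 : e.length + 5 - Int.toNat 5 = e.length := by simp
  simp only [h2]
  have hget : (e ++ [t0, t1, t2, t3, t4])[e.length]? = some t0 := by
    rw [show (e ++ [t0, t1, t2, t3, t4]) = e ++ t0 :: [t1, t2, t3, t4] by simp]
    rw [List.getElem?_append_right (le_refl _)]
    simp
  refine ⟨by simpa [List.getElem_eq_iff] using hget, ?_⟩
  rw [show (e ++ [t0, t1, t2, t3, t4]) = e ++ t0 :: [t1, t2, t3, t4] by simp]
  exact wmEraseIdx_append e t0 [t1, t2, t3, t4]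

theorem wmLoopA_step (wl acc : List String) (h : 5 < wl.length)
    {x y z : String} {wl1 wl2 wl3 : List String}
    (h5 : PySem.List.pop? wl (-5) = some (x, wl1))
    (h0 : PySem.List.pop? wl1 0 = some (y, wl2))
    (h1 : PySem.List.pop? wl2 (-1) = some (z, wl3)) :
    wmLoopA wl acc = wmLoopA wl3 (((acc ++ [x]) ++ [y]) ++ [z]) := by
  rw [wmLoopA, if_pos h]
  split
  next heq => rw [heq] at h5; cases h5
  next u v heq =>
    rw [heq] at h5
    injection h5 with h5'
    injection h5' with hx hw
    subst hx; subst hw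
    split
    next heq0 => rw [heq0] at h0; cases h0
    next u v heq0 =>
      rw [heq0] at h0
      injection h0 with h0'
      injection h0' with hy hw2
      subst hy; subst hw2
      split
      next heq1 => rw [heq1] at h1; cases h1
      next u v heq1 =>
        rw [heq1] at h1
        injection h1 with h1'
        injection h1' with hz hw3
        subst hz; subst hw3
        rfl

theorem wmLoopB_step (s : List String) (f b : Nat) (tail acc : List String)
    (h : 5 < (b - f) + tail.length)
    {x z : String} {tail1 tail2 : List String}
    (h0 : PySem.List.pop? tail 0 = some (x, tail1))
    (h1 : PySem.List.pop? tail1 (-1) = some (z, tail2)) :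
    wmLoopB s f b tail acc
      = wmLoopB s (f + 1) (wmRefill s (f + 1) b tail2).1 (wmRefill s (f + 1) b tail2).2
          (((acc ++ [x]) ++ [(PySem.List.pyGet? s ((f : Nat) : Int)).getD ""]) ++ [z]) := by
  rw [wmLoopB, if_pos h]
  split
  next heq => rw [heq] at h0; cases h0
  next u v heq =>
    rw [heq] at h0
    injection h0 with h0'
    injection h0' with hx hw
    subst hx; subst hw
    split
    next heq1 => rw [heq1] at h1; cases h1
    next u v heq1 =>
      rw [heq1] at h1
      injection h1 with h1'
      injection h1' with hz hw2
      subst hz; subst hw2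
      rfl

theorem wmLoop_eq (m : Nat) : ∀ (s : List String) (f b : Nat) (tail acc : List String),
    (b - f) + tail.length ≤ m → f ≤ b → b ≤ s.length → tail.length ≤ 5 →
    (tail.length < 5 → b = f) →
    wmLoopA (wmExt s f b ++ tail) acc = wmLoopB s f b tail acc := by
  induction m with
  | zero =>
    intro s f b tail acc hm hfb hb ht hinv
    have hlen : (wmExt s f b ++ tail).length = (b - f) + tail.length := by
      simp [wmExt_length s f b hb]
    rw [wmLoopA, wmLoopB, if_neg (by omega), if_neg (by omega)]
  | succ m ih =>
    intro s f b tail acc hm hfb hb ht hinv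
    have hlen : (wmExt s f b ++ tail).length = (b - f) + tail.length := by
      simp [wmExt_length s f b hb]
    by_cases hgo : 5 < (b - f) + tail.length
    · -- the loop body runs: tail must be exactly 5 long
      have ht5 : tail.length = 5 := by
        by_contra hne
        have : tail.length < 5 := by omega
        have := hinv this
        omega
      obtain ⟨t0, t1, t2, t3, t4, rfl⟩ :
          ∃ a0 a1 a2 a3 a4, tail = [a0, a1, a2, a3, a4] := by
        match tail, ht5 with
        | [a0, a1, a2, a3, a4], _ => exact ⟨a0, a1, a2, a3, a4, rfl⟩
      have hflt : f < b := by omega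
      have hfs : f < s.length := by omega
      have hcons := wmExt_cons s f b hflt hb
      -- A's three pops
      rw [wmLoopA_step (wmExt s f b ++ [t0, t1, t2, t3, t4]) acc (by omega)
        (wmPop_neg5 (wmExt s f b) t0 t1 t2 t3 t4)
        (y := s.getD f "") (wl2 := wmExt s (f + 1) b ++ [t1, t2, t3, t4])
        (by rw [show wmExt s f b ++ [t1, t2, t3, t4]
              = s.getD f "" :: (wmExt s (f + 1) b ++ [t1, t2, t3, t4]) by rw [hcons]; simp]
            exact PySem.List.pop?_zero_cons _ _)
        (by rw [show wmExt s (f + 1) b ++ [t1, t2, t3, t4]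
              = (wmExt s (f + 1) b ++ [t1, t2, t3]) ++ [t4] by simp]
            exact PySem.List.pop?_last _ _)]
      -- B's three pops
      rw [wmLoopB_step s f b [t0, t1, t2, t3, t4] acc (by simpa using hgo)
        (PySem.List.pop?_zero_cons _ _)
        (by rw [show [t1, t2, t3, t4] = [t1, t2, t3] ++ [t4] from rfl]
            exact PySem.List.pop?_last _ _)]
      have hy : (PySem.List.pyGet? s ((f : Nat) : Int)).getD "" = s.getD f "" := by
        rw [PySem.List.pyGet?_natCast, List.getD_eq_getElem?_getD]
      rw [hy]
      -- the refill and the induction hypothesis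
      have hr := wmRefill_spec s b (f + 1) [t1, t2, t3] (by omega) hb (by simp)
      have hmeas := wmRefill_measure s b (f + 1) [t1, t2, t3]
      rw [← hr.2.2.2.2]
      exact ih s (f + 1) (wmRefill s (f + 1) b [t1, t2, t3]).1
        (wmRefill s (f + 1) b [t1, t2, t3]).2 _
        (by simp at hmeas; omega) hr.1 (le_trans hr.2.1 hb) hr.2.2.1
        (fun hl => hr.2.2.2.1 hl)
    · rw [wmLoopA, wmLoopB, if_neg (by omega), if_neg (by omega)]

-- ===== VERDICT (by name: the statement is the Claim_ definition above) =====
theorem word_mixer_spec : Claim_equal_word_mixer := by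
  intro wl _
  unfold Spec_word_mixer word_mixer word_mixer_alt
  simp only []
  generalize PySem.List.sorted wl (fun w => w) false = s
  by_cases hn : s.length ≤ 5
  · rw [if_pos hn, wmLoopA, if_neg (by omega)]
  · rw [if_neg hn]
    have h5 : 5 < s.length := by omega
    have htail : PySem.List.slice s (some ((s.length - 5 : Nat) : Int)) none
        = s.drop (s.length - 5) := PySem.List.slice_from_natCast s (s.length - 5)
    rw [htail]
    have hsplit : wmExt s 0 (s.length - 5) ++ s.drop (s.length - 5) = s := by
      simp [wmExt]
    conv_lhs => rw [← hsplit]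
    exact wmLoop_eq s.length s 0 (s.length - 5) (s.drop (s.length - 5)) []
      (by simp only [List.length_drop, Nat.sub_zero]; omega) (by omega) (by omega)
      (by simp only [List.length_drop]; omega) (by intro h; simp only [List.length_drop] at h; omega)
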